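-- pv_equiv track=rewrite | github.com/paulsignorelli/simple-sql-parser | parse_sql_final.py | smart_column_split
-- ===== SOURCE A (Python) =====
-- def smart_column_split(select_clause):
--     cols = []
--     current = ''
--     depth = 0
--     for char in select_clause:
--         if char == ',' and depth == 0:
--             cols.append(current.strip())
--             current = ''
--         else:
--             current += char
--             if char == '(':
--                 depth += 1
--             elif char == ')':
--                 depth -= 1
--     if current:
--         cols.append(current.strip())
--     return cols
-- ===== SOURCE B (Python) =====
-- def smart_column_split(select_clause):
--     # pass 1: indices of commas at parenthesis depth 0
--     boundaries = []
--     depth = 0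
--     for i, char in enumerate(select_clause):
--         if char == ',' and depth == 0:
--             boundaries.append(i)
--         elif char == '(':
--             depth += 1
--         elif char == ')':
--             depth -= 1
--     # pass 2: slice between boundaries
--     cols = []
--     start = 0
--     for b in boundaries:
--         cols.append(select_clause[start:b].strip())
--         start = b + 1
--     last = select_clause[start:]
--     if last:
--         cols.append(last.strip())
--     return cols
-- ===== Notes on version B (the rewrite author's own statement) =====
-- stated objective: alternative
-- what changed: Replaces A's single pass that accumulates the current segment character by character with a two-pass index-based algorithm: first collect the indices of commas at parenthesis depth 0, then slice the string between consecutive boundaries (stripping each slice, dropping only an empty final slice).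
import Mathlib
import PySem

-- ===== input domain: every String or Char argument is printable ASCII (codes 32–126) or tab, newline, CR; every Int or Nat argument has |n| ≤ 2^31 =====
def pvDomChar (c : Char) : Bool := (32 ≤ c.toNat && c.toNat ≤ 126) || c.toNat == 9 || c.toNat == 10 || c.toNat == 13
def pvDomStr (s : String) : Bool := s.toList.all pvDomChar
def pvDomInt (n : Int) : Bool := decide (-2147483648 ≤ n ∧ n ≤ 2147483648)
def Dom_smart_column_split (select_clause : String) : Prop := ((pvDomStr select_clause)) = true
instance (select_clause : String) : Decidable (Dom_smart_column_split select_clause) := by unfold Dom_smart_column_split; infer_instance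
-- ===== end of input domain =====

-- B replaces A's single accumulating pass by two passes — collect the indices of
-- depth-0 commas, then slice the string at those boundaries (objective: alternative decomposition).

-- ===== PORT A =====
-- one step of A's for-loop: state = (cols, current, depth)
def pvStepA (st : List String × List Char × Int) (c : Char) : List String × List Char × Int :=
  let (cols, current, depth) := st
  if c = ',' ∧ depth = 0 then (cols ++ [String.ofList (PySem.Chars.strip current)], [], depth)
  else
    let current := current ++ [c]
    let depth := if c = '(' then depth + 1 else if c = ')' then depth - 1 else depth
    (cols, current, depth)

def smart_column_split (select_clause : String) : List String :=
  let st := select_clause.toList.foldl pvStepA ([], [], 0)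
  let cols := st.1
  let current := st.2.1
  if current ≠ [] then cols ++ [String.ofList (PySem.Chars.strip current)] else cols

-- ===== PORT B =====
-- pass 1 step: state = (depth, boundaries), element = (i, char) from enumerate
def pvStepB1 (st : Int × List Int) (ic : Int × Char) : Int × List Int :=
  let (depth, bs) := st
  let (i, c) := ic
  if c = ',' ∧ depth = 0 then (depth, bs ++ [i])
  else if c = '(' then (depth + 1, bs)
  else if c = ')' then (depth - 1, bs)
  else (depth, bs)

-- pass 2 step: state = (cols, start), element = a boundary index
def pvStepB2 (cs : List Char) (st : List String × Int) (b : Int) : List String × Int :=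
  let (cols, start) := st
  (cols ++ [String.ofList (PySem.Chars.strip (PySem.List.slice cs (some start) (some b)))], b + 1)

def smart_column_split_alt (select_clause : String) : List String :=
  let cs := select_clause.toList
  let boundaries := ((PySem.List.enumerate cs 0).foldl pvStepB1 (0, [])).2
  let st := boundaries.foldl (pvStepB2 cs) ([], 0)
  let cols := st.1
  let start := st.2
  let last := PySem.List.slice cs (some start) none
  if last ≠ [] then cols ++ [String.ofList (PySem.Chars.strip last)] else cols

-- ===== PRECONDITION & SPEC =====
def Spec_smart_column_split (select_clause : String) (out : List String) : Prop := out = smart_column_split_alt select_clause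
instance (select_clause : String) (out : List String) : Decidable (Spec_smart_column_split select_clause out) := by unfold Spec_smart_column_split; infer_instance

-- ===== CLAIM (what is proved, stated in full; the proofs are below) =====
def Claim_equal_smart_column_split : Prop := ∀ (select_clause : String), Dom_smart_column_split select_clause → Spec_smart_column_split select_clause (smart_column_split select_clause)

-- ===== LEMMAS AND PROOFS =====

-- A's loop written as plain recursion (comma at depth 0 resets depth to 0 = unchanged)
def pvGoA : List Char → List Char → Int → List String
  | [], cur, _ => if cur ≠ [] then [String.ofList (PySem.Chars.strip cur)] else []
  | c :: cs, cur, d =>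
    if c = ',' ∧ d = 0 then String.ofList (PySem.Chars.strip cur) :: pvGoA cs [] 0
    else pvGoA cs (cur ++ [c]) (if c = '(' then d + 1 else if c = ')' then d - 1 else d)

-- B's pass 1 written as plain recursion: boundary indices starting at index i
def pvBnds : List Char → Int → Int → List Int
  | [], _, _ => []
  | c :: cs, d, i =>
    if c = ',' ∧ d = 0 then i :: pvBnds cs 0 (i + 1)
    else pvBnds cs (if c = '(' then d + 1 else if c = ')' then d - 1 else d) (i + 1)

-- B's pass 2 (incl. the final-segment rule) written as plain recursion
def pvP2 (cs : List Char) : List Int → Int → List String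
  | [], start =>
    let last := PySem.List.slice cs (some start) none
    if last ≠ [] then [String.ofList (PySem.Chars.strip last)] else []
  | b :: bs, start =>
    String.ofList (PySem.Chars.strip (PySem.List.slice cs (some start) (some b))) :: pvP2 cs bs (b + 1)

def pvFinA (st : List String × List Char × Int) : List String :=
  if st.2.1 ≠ [] then st.1 ++ [String.ofList (PySem.Chars.strip st.2.1)] else st.1

theorem pvA_fold (cs : List Char) : ∀ (cols : List String) (cur : List Char) (d : Int),
    pvFinA (cs.foldl pvStepA (cols, cur, d)) = cols ++ pvGoA cs cur d := by
  induction cs with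
  | nil =>
    intro cols cur d
    simp only [List.foldl_nil, pvFinA, pvGoA]
    split <;> simp
  | cons c cs ih =>
    intro cols cur d
    simp only [List.foldl_cons, pvStepA, pvGoA]
    by_cases h : c = ',' ∧ d = 0
    · rcases h with ⟨hc, hd⟩
      subst hc hd
      simp [ih]
    · simp only [if_neg h, ih]

theorem pvB1_fold (cs : List Char) : ∀ (i d : Int) (bs : List Int),
    ((PySem.List.enumerate cs i).foldl pvStepB1 (d, bs)).2 = bs ++ pvBnds cs d i := by
  induction cs with
  | nil => intro i d bs; simp [PySem.List.enumerate, pvBnds]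
  | cons c cs ih =>
    intro i d bs
    have he : PySem.List.enumerate (c :: cs) i = (i, c) :: PySem.List.enumerate cs (i + 1) := by
      simp [PySem.List.enumerate]
    rw [he]
    simp only [List.foldl_cons, pvStepB1, pvBnds]
    by_cases h : c = ',' ∧ d = 0
    · rcases h with ⟨hc, hd⟩
      subst hc hd
      simp [ih]
    · rw [if_neg h, if_neg h]
      by_cases h1 : c = '('
      · simp [h1, ih]
      · by_cases h2 : c = ')'
        · simp [h1, h2, ih]
        · simp [h1, h2, ih]

def pvFinB (cs : List Char) (st : List String × Int) : List String :=
  let last := PySem.List.slice cs (some st.2) none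
  if last ≠ [] then st.1 ++ [String.ofList (PySem.Chars.strip last)] else st.1

theorem pvB2_fold (cs : List Char) (bs : List Int) : ∀ (cols : List String) (start : Int),
    pvFinB cs (bs.foldl (pvStepB2 cs) (cols, start)) = cols ++ pvP2 cs bs start := by
  induction bs with
  | nil =>
    intro cols start
    simp only [List.foldl_nil, pvFinB, pvP2]
    split <;> simp
  | cons b bs ih =>
    intro cols start
    simp only [List.foldl_cons, pvStepB2, pvP2, ih]
    simp

-- the central invariant: slicing at the boundaries of the remaining suffix reproduces A's loop
theorem pvMain (cs : List Char) : ∀ (d : Int) (u cur : List Char),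
    pvP2 (u ++ cur ++ cs) (pvBnds cs d (((u.length + cur.length : Nat) : Int))) ((u.length : Nat) : Int)
      = pvGoA cs cur d := by
  induction cs with
  | nil =>
    intro d u cur
    simp only [pvBnds, pvP2, pvGoA, PySem.List.slice_from_natCast, List.append_nil]
    rw [List.drop_left]
  | cons c cs ih =>
    intro d u cur
    by_cases h : c = ',' ∧ d = 0
    · rcases h with ⟨hc, hd⟩
      subst hc hd
      rw [show pvBnds (',' :: cs) 0 (((u.length + cur.length : Nat) : Int))
            = ((u.length + cur.length : Nat) : Int)
                :: pvBnds cs 0 (((u.length + cur.length : Nat) : Int) + 1) from by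
          simp [pvBnds]]
      rw [show pvGoA (',' :: cs) cur 0
            = String.ofList (PySem.Chars.strip cur) :: pvGoA cs [] 0 from by simp [pvGoA]]
      rw [pvP2]
      congr 1
      · congr 2
        rw [PySem.List.slice_natCast]
        have h1 : u.length + cur.length - u.length = cur.length := by omega
        rw [h1, show u ++ cur ++ (',' :: cs) = u ++ (cur ++ ',' :: cs) from by simp,
            List.drop_left]
        exact List.take_left ..
      · have hfull : u ++ cur ++ (',' :: cs) = (u ++ cur ++ [',']) ++ cs := by simp
        have hlen2 : ((u.length + cur.length : Nat) : Int) + 1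
            = (((u ++ cur ++ [',']).length : Nat) : Int) := by
          simp; ring
        have hih := ih 0 (u ++ cur ++ [',']) []
        simp only [List.length_nil, Nat.add_zero, List.append_nil] at hih
        rw [hfull, hlen2]
        exact hih
    · rw [show pvBnds (c :: cs) d (((u.length + cur.length : Nat) : Int))
            = pvBnds cs (if c = '(' then d + 1 else if c = ')' then d - 1 else d)
                (((u.length + cur.length : Nat) : Int) + 1) from by
          rw [pvBnds, if_neg h]]
      rw [show pvGoA (c :: cs) cur d
            = pvGoA cs (cur ++ [c]) (if c = '(' then d + 1 else if c = ')' then d - 1 else d)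
          from by rw [pvGoA, if_neg h]]
      have hfull : u ++ cur ++ (c :: cs) = u ++ (cur ++ [c]) ++ cs := by simp
      have hlen : ((u.length + cur.length : Nat) : Int) + 1
          = ((u.length + (cur ++ [c]).length : Nat) : Int) := by
        simp; ring
      rw [hfull, hlen]
      exact ih _ u (cur ++ [c])

theorem pvA_eq_goA (s : String) :
    smart_column_split s = pvGoA s.toList [] 0 := by
  have := pvA_fold s.toList [] [] 0
  simpa [smart_column_split, pvFinA] using this

theorem pvB_eq_goA (s : String) :
    smart_column_split_alt s = pvGoA s.toList [] 0 := by
  have h1 := pvB1_fold s.toList 0 0 []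
  have h2 := pvB2_fold s.toList (pvBnds s.toList 0 0) [] 0
  have h3 := pvMain s.toList 0 [] []
  simp only [List.nil_append, List.length_nil, Nat.add_zero, Nat.cast_zero] at h3
  simp only [List.nil_append] at h1 h2
  simp only [smart_column_split_alt]
  rw [h1]
  unfold pvFinB at h2
  simp only at h2
  rw [h2, h3]

-- ===== VERDICT (by name: the statement is the Claim_ definition above) =====
theorem smart_column_split_spec : Claim_equal_smart_column_split := by
  intro s _
  unfold Spec_smart_column_split
  rw [pvA_eq_goA, pvB_eq_goA]
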